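-- pv_equiv track=rewrite | github.com/WZBSocialScienceCenter/tmtoolkit | tmtoolkit/preprocess.py | remove_special_chars_in_tokens
-- ===== SOURCE A (Python) =====
-- import string
--
-- def remove_special_chars_in_tokens(tokens, special_chars):
--     if not special_chars:
--         raise ValueError('`special_chars` must be a non-empty sequence')
--
--     special_chars_str = u''.join(special_chars)
--
--     if 'maketrans' in dir(string):  # python 2
--         del_chars = {ord(c): None for c in special_chars}
--         return [t.translate(del_chars) for t in tokens]
--     elif 'maketrans' in dir(str):  # python 3
--         del_chars = str.maketrans('', '', special_chars_str)
--         return [t.translate(del_chars) for t in tokens]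
--     else:
--         raise RuntimeError('no maketrans() function found')
-- ===== SOURCE B (Python) =====
-- def remove_special_chars_in_tokens(tokens, special_chars):
--     if not special_chars:
--         raise ValueError('`special_chars` must be a non-empty sequence')
--
--     uniq = list(dict.fromkeys(''.join(special_chars)))
--     cleaned = []
--     for t in tokens:
--         for c in uniq:
--             t = t.replace(c, '')
--         cleaned.append(t)
--     return cleaned
-- ===== Notes on version B (the rewrite author's own statement) =====
-- stated objective: alternative
-- what changed: B deletes the (deduplicated, insertion-ordered) special characters one by one with repeated str.replace instead of building a str.maketrans translation table and calling t.translate.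
-- outside the precondition, e.g. on remove_special_chars_in_tokens(['abc'], []): A raises ValueError, B raises ValueError
import Mathlib
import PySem

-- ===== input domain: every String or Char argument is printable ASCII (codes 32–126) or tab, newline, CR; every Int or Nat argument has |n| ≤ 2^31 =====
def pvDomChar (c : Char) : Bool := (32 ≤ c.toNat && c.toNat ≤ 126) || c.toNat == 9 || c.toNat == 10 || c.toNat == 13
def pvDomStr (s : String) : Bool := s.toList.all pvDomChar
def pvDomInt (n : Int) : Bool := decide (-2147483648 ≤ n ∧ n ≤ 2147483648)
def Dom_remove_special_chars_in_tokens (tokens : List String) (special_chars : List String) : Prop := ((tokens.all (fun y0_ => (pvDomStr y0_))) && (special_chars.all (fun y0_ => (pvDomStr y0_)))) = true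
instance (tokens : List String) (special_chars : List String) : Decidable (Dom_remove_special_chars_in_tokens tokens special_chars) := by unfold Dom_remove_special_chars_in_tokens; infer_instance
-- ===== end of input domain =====

-- B strips each distinct special character with repeated str.replace instead of building a maketrans
-- table and translating; objective: alternative (same cost, no translation table or dir() introspection).

-- ===== PORT A =====
def remove_special_chars_in_tokens (tokens : List String) (special_chars : List String) : List String :=
  -- `if not special_chars: raise ValueError(...)` → excluded by Pre_
  let special_chars_str := PySem.Str.join "" special_chars
  -- python3 branch: del_chars = str.maketrans('', '', special_chars_str); [t.translate(del_chars) ...]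
  -- translate with a deletion-only table is ported by hand, exact: drop every char of special_chars_str
  tokens.map (fun t => String.ofList (t.toList.filter (fun ch => !(special_chars_str.toList.contains ch))))

-- ===== PORT B =====
-- list(dict.fromkeys(s)) keeps the first occurrence of each character, in order; ported exactly:
def pvFromkeys : List Char → List Char → List Char
  | [], _ => []
  | c :: t, seen => if seen.contains c then pvFromkeys t seen else c :: pvFromkeys t (c :: seen)

def remove_special_chars_in_tokens_alt (tokens : List String) (special_chars : List String) : List String :=
  -- `if not special_chars: raise ValueError(...)` → excluded by Pre_
  let uniq := pvFromkeys (PySem.Str.join "" special_chars).toList []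
  tokens.map (fun t => uniq.foldl (fun s c => PySem.Str.replace s (String.ofList [c]) "") t)

-- ===== PRECONDITION & SPEC =====
-- A raises ValueError exactly when special_chars is the empty list; B raises there too.
def Pre_remove_special_chars_in_tokens (_tokens : List String) (special_chars : List String) : Prop := special_chars ≠ []
instance (tokens : List String) (special_chars : List String) : Decidable (Pre_remove_special_chars_in_tokens tokens special_chars) := by unfold Pre_remove_special_chars_in_tokens; infer_instance

def pvWitness_remove_special_chars_in_tokens : List String × List String := (["ab,c.", "x!y"], [",.", "!"])

def Spec_remove_special_chars_in_tokens (tokens : List String) (special_chars : List String) (out : List String) : Prop := out = remove_special_chars_in_tokens_alt tokens special_chars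
instance (tokens : List String) (special_chars : List String) (out : List String) : Decidable (Spec_remove_special_chars_in_tokens tokens special_chars out) := by unfold Spec_remove_special_chars_in_tokens; infer_instance

-- ===== CLAIM (what is proved, stated in full; the proofs are below) =====
def Claim_equal_remove_special_chars_in_tokens : Prop := ∀ (tokens : List String) (special_chars : List String), Dom_remove_special_chars_in_tokens tokens special_chars → Pre_remove_special_chars_in_tokens tokens special_chars → Spec_remove_special_chars_in_tokens tokens special_chars (remove_special_chars_in_tokens tokens special_chars)

-- ===== LEMMAS AND PROOFS =====

-- replace.go with a one-character pattern and empty replacement filters that character out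
theorem pv_go_single (c : Char) : ∀ (l : List Char) (fuel : Nat) (acc : List Char), l.length ≤ fuel →
    PySem.Chars.replace.go [c] [] fuel l acc = acc.reverse ++ l.filter (fun x => x ≠ c) := by
  intro l
  induction l with
  | nil =>
    intro fuel acc _
    cases fuel <;> simp [PySem.Chars.replace.go]
  | cons c' t ih =>
    intro fuel acc hf
    cases fuel with
    | zero => simp at hf
    | succ f =>
      have ht : t.length ≤ f := by simpa using hf
      by_cases h : c = c'
      · subst h
        simp only [PySem.Chars.replace.go, List.isPrefixOf]
        simpa using ih f acc ht
      · simp only [PySem.Chars.replace.go, List.isPrefixOf]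
        rw [if_neg (by simp [h]), ih f (c' :: acc) ht]
        simp [Ne.symm h]

theorem pv_replace_single (c : Char) (s : List Char) :
    PySem.Chars.replace s [c] [] = s.filter (fun x => x ≠ c) := by
  simp [PySem.Chars.replace, pv_go_single c s s.length [] le_rfl]

-- folding single-character deletions over ds filters out every character of ds
theorem pv_fold_replace (ds : List Char) : ∀ (cs : List Char),
    ds.foldl (fun s c => PySem.Chars.replace s [c] []) cs
      = cs.filter (fun ch => !(ds.contains ch)) := by
  induction ds with
  | nil => intro cs; simp
  | cons d ds ih =>
    intro cs
    simp only [List.foldl_cons]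
    rw [pv_replace_single, ih, List.filter_filter]
    apply List.filter_congr
    intro ch _
    by_cases h : ch = d <;> simp [h]

-- the String-level fold in port B computes the list-level fold on toList
theorem pv_fold_toList (ds : List Char) : ∀ (t : String),
    (ds.foldl (fun s c => PySem.Str.replace s (String.ofList [c]) "") t).toList
      = ds.foldl (fun s c => PySem.Chars.replace s [c] []) t.toList := by
  induction ds with
  | nil => intro t; simp
  | cons d ds ih =>
    intro t
    simp [List.foldl_cons, ih, PySem.Str.toList_replace, String.toList_ofList]

-- pvFromkeys keeps exactly the elements not yet seen
theorem pv_mem_fromkeys (x : Char) : ∀ (l seen : List Char),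
    x ∈ pvFromkeys l seen ↔ x ∈ l ∧ x ∉ seen := by
  intro l
  induction l with
  | nil => intro seen; simp [pvFromkeys]
  | cons c t ih =>
    intro seen
    by_cases h : c ∈ seen
    · by_cases hxc : x = c
      · subst hxc
        simp [pvFromkeys, h, ih]
      · simp [pvFromkeys, h, ih, hxc]
    · by_cases hxc : x = c
      · subst hxc
        simp [pvFromkeys, h, ih]
      · simp [pvFromkeys, h, ih, hxc]

-- ===== VERDICT (by name: the statement is the Claim_ definition above) =====
theorem remove_special_chars_in_tokens_spec : Claim_equal_remove_special_chars_in_tokens := by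
  intro tokens special_chars _ _
  unfold Spec_remove_special_chars_in_tokens
  unfold remove_special_chars_in_tokens remove_special_chars_in_tokens_alt
  apply List.map_congr_left
  intro t _
  apply String.toList_injective
  rw [pv_fold_toList, pv_fold_replace]
  simp only [String.toList_ofList]
  apply List.filter_congr
  intro ch _
  simp [pv_mem_fromkeys]
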